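-- pv_equiv track=rewrite | github.com/fengyu9481/stereo-xcr-seq | cyclone_immune_repertoire/scripts/ReadSplit.py | find_all_closest_triplet
-- ===== SOURCE A (Python) =====
-- def find_closest_triplet(a_list, b_list, c_list):
--     for tmp in [a_list,b_list,c_list]:
--         if tmp == 'NA' or len(tmp) == 0:
--             return 'NA'
--     a_list.sort(reverse=True)
--     b_list.sort(reverse=True)
--     c_list.sort(reverse=True)
--     closest_a = a_list[0]
--     closest_b = b_list[0]
--     closest_c = c_list[0]
--     closest_diff = float("inf")
--     for a in a_list:
--         for b in b_list:
--             if a <= b: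
--                 continue
--             for c in c_list:
--                 if b <= c:
--                     continue
--                 diff = a - c
--                 if diff < closest_diff:
--                     closest_a, closest_b, closest_c = a, b, c
--                     closest_diff = diff
--     if closest_a > closest_b and closest_b > closest_c:
--         return [closest_a, closest_b, closest_c]
--     else:
--         return 'NA'
--
-- def find_all_closest_triplet(a,b,c,reverse = False):
--     result_list = []
--     tmp_sign = True
--     while tmp_sign:
--         position = find_closest_triplet(a, b, c)
--         if position != 'NA':
--             a = [num for num in a if num != position[0]]
--             b = [num for num in b if num != position[1]]
--             c = [num for num in c if num != position[2]]
--             result_list.append(position)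
--         else:
--             tmp_sign = False
--     if reverse:
--         new_list = []
--         for result in result_list :
--             new_list.append(result[::-1])
--         return new_list
--     return result_list
-- ===== SOURCE B (Python) =====
-- # B: per-round single pass over the a-values with "largest value below a limit"
-- # scans on the descending-sorted b and c lists, instead of A's triple nested loop.
-- # Return-value equivalence only: A additionally sorts the caller's lists in place.
--
-- def _max_below(values, limit):
--     # values sorted descending: first value < limit is the largest one below it
--     for v in values:
--         if v < limit:
--             return v
--     return None
--
-- def _closest(a, b, c):
--     if not a or not b or not c:
--         return None
--     A = sorted(a, reverse=True)
--     B = sorted(b, reverse=True)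
--     C = sorted(c, reverse=True)
--     best = None
--     for x in A:
--         y = _max_below(B, x)
--         if y is None:
--             continue
--         z = _max_below(C, y)
--         if z is None:
--             continue
--         if best is None or x - z < best[0] - best[2]:
--             best = (x, y, z)
--     return best
--
-- def find_all_closest_triplet(a, b, c, reverse=False):
--     result_list = []
--     while True:
--         t = _closest(a, b, c)
--         if t is None:
--             break
--         x, y, z = t
--         a = [num for num in a if num != x]
--         b = [num for num in b if num != y]
--         c = [num for num in c if num != z]
--         result_list.append([z, y, x] if reverse else [x, y, z])
--     return result_list
-- ===== Notes on version B (the rewrite author's own statement) =====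
-- stated objective: faster
-- what changed: Each extraction round replaces A's triple nested loop over all (a,b,c) combinations by a single pass over the descending-sorted a-values that finds, per a, the largest b below a and the largest c below that b via first-match scans on the sorted b/c lists.
import Mathlib
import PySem

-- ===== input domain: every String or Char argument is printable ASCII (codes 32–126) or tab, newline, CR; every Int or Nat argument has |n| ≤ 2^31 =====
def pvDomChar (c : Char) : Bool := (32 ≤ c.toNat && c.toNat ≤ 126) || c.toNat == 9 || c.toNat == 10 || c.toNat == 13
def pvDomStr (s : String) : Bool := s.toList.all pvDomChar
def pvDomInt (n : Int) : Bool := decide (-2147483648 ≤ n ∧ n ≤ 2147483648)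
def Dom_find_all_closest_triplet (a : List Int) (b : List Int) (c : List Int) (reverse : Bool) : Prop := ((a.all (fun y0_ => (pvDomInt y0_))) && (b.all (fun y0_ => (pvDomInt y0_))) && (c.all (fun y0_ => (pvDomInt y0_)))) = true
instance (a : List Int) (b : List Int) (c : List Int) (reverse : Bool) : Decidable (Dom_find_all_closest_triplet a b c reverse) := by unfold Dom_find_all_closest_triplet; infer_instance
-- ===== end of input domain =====

-- B replaces A's triple nested minimum search by a single pass over the a-values with
-- largest-below scans on the descending-sorted b/c lists (objective: faster).
-- Return-value equivalence only: Python A also sorts the caller's lists in place.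

-- ===== PORT A =====
-- the helper's string result 'NA' is ported as `none`

def pvSortDesc (l : List Int) : List Int := PySem.List.sorted l (fun x => x) true

def pvUpdA (s : Int × Int × Int × Option Int) (a b c : Int) : Int × Int × Int × Option Int :=
  match s.2.2.2 with                           -- closest_diff = float("inf")  ↦  none
  | none => (a, b, c, some (a - c))
  | some k => if a - c < k then (a, b, c, some (a - c)) else s

def pvStepC (a b : Int) (s : Int × Int × Int × Option Int) (c : Int) : Int × Int × Int × Option Int :=
  if b ≤ c then s else pvUpdA s a b c

def pvStepB (cl : List Int) (a : Int) (s : Int × Int × Int × Option Int) (b : Int) : Int × Int × Int × Option Int :=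
  if a ≤ b then s else cl.foldl (pvStepC a b) s

def pyFindClosest (al bl cl : List Int) : Option (Int × Int × Int) :=
  if al.length = 0 ∨ bl.length = 0 ∨ cl.length = 0 then none
  else
    let A := pvSortDesc al
    let B := pvSortDesc bl
    let C := pvSortDesc cl
    let s := A.foldl (fun s a => B.foldl (pvStepB C a) s) (A.headI, B.headI, C.headI, (none : Option Int))
    if s.1 > s.2.1 ∧ s.2.1 > s.2.2.1 then some (s.1, s.2.1, s.2.2.1) else none

def pyLoop : Nat → List Int → List Int → List Int → List (List Int)
  | 0, _, _, _ => []
  | fuel + 1, al, bl, cl =>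
    match pyFindClosest al bl cl with
    | none => []
    | some (x, y, z) =>
      [x, y, z] :: pyLoop fuel (al.filter (fun num => num ≠ x)) (bl.filter (fun num => num ≠ y)) (cl.filter (fun num => num ≠ z))

-- fuel a.length + 1 is enough for Python's while loop: each round removes the chosen value from a
def find_all_closest_triplet (a : List Int) (b : List Int) (c : List Int) (reverse : Bool) : List (List Int) :=
  let result := pyLoop (a.length + 1) a b c
  if reverse then result.map List.reverse else result  -- result[::-1] on a list is its reverse

-- ===== PORT B =====

def pvMaxBelow : List Int → Int → Option Int
  | [], _ => none
  | v :: vs, lim => if v < lim then some v else pvMaxBelow vs lim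

def pvStepAlt (B C : List Int) (s : Option (Int × Int × Int)) (x : Int) : Option (Int × Int × Int) :=
  match pvMaxBelow B x with
  | none => s
  | some y =>
    match pvMaxBelow C y with
    | none => s
    | some z =>
      match s with
      | none => some (x, y, z)
      | some t => if x - z < t.1 - t.2.2 then some (x, y, z) else s

def altClosest (al bl cl : List Int) : Option (Int × Int × Int) :=
  if al.length = 0 ∨ bl.length = 0 ∨ cl.length = 0 then none
  else
    let A := pvSortDesc al
    let B := pvSortDesc bl
    let C := pvSortDesc cl
    A.foldl (pvStepAlt B C) none

def altLoop : Nat → List Int → List Int → List Int → Bool → List (List Int)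
  | 0, _, _, _, _ => []
  | fuel + 1, al, bl, cl, rev =>
    match altClosest al bl cl with
    | none => []
    | some (x, y, z) =>
      (if rev then [z, y, x] else [x, y, z]) ::
        altLoop fuel (al.filter (fun num => num ≠ x)) (bl.filter (fun num => num ≠ y)) (cl.filter (fun num => num ≠ z)) rev

def find_all_closest_triplet_alt (a : List Int) (b : List Int) (c : List Int) (reverse : Bool) : List (List Int) :=
  altLoop (a.length + 1) a b c reverse

-- ===== PRECONDITION & SPEC =====
def Spec_find_all_closest_triplet (a : List Int) (b : List Int) (c : List Int) (reverse : Bool) (out : List (List Int)) : Prop := out = find_all_closest_triplet_alt a b c reverse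
instance (a : List Int) (b : List Int) (c : List Int) (reverse : Bool) (out : List (List Int)) : Decidable (Spec_find_all_closest_triplet a b c reverse out) := by unfold Spec_find_all_closest_triplet; infer_instance

-- ===== CLAIM (what is proved, stated in full; the proofs are below) =====
def Claim_equal_find_all_closest_triplet : Prop := ∀ (a : List Int) (b : List Int) (c : List Int) (reverse : Bool), Dom_find_all_closest_triplet a b c reverse → Spec_find_all_closest_triplet a b c reverse (find_all_closest_triplet a b c reverse)

-- ===== LEMMAS AND PROOFS =====

theorem mb_lt {l : List Int} {x v : Int} (h : pvMaxBelow l x = some v) : v < x := by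
  induction l with
  | nil => simp [pvMaxBelow] at h
  | cons w ws ih =>
    by_cases hw : w < x
    · simp [pvMaxBelow, hw] at h; omega
    · simp [pvMaxBelow, hw] at h; exact ih h

theorem mb_mem {l : List Int} {x v : Int} (h : pvMaxBelow l x = some v) : v ∈ l := by
  induction l with
  | nil => simp [pvMaxBelow] at h
  | cons w ws ih =>
    by_cases hw : w < x
    · simp [pvMaxBelow, hw] at h; simp [h]
    · simp [pvMaxBelow, hw] at h; exact List.mem_cons_of_mem _ (ih h)

theorem mb_none_mono {l : List Int} {x x' : Int} (h : pvMaxBelow l x = none) (hx : x' ≤ x) :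
    pvMaxBelow l x' = none := by
  induction l with
  | nil => simp [pvMaxBelow]
  | cons w ws ih =>
    by_cases hw : w < x
    · simp [pvMaxBelow, hw] at h
    · simp only [pvMaxBelow] at h ⊢
      have : ¬ w < x' := by omega
      rw [if_neg hw] at h
      rw [if_neg this]
      exact ih h

theorem mb_mono {l : List Int} {x x' z' : Int} (hl : l.Pairwise (fun p q => q ≤ p))
    (h : pvMaxBelow l x' = some z') (hx : x' ≤ x) :
    ∃ z, pvMaxBelow l x = some z ∧ z' ≤ z := by
  induction l with
  | nil => simp [pvMaxBelow] at h
  | cons w ws ih =>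
    rcases List.pairwise_cons.mp hl with ⟨hw, hws⟩
    by_cases hwx : w < x
    · refine ⟨w, by simp [pvMaxBelow, hwx], ?_⟩
      by_cases hwx' : w < x'
      · simp [pvMaxBelow, hwx'] at h; omega
      · simp only [pvMaxBelow, if_neg hwx'] at h
        exact hw z' (mb_mem h)
    · have hwx' : ¬ w < x' := by omega
      simp only [pvMaxBelow, if_neg hwx, if_neg hwx'] at h ⊢
      exact ih hws h

theorem foldl_fixed {α β : Type} (f : α → β → α) (s : α) (l : List β) (h : ∀ x ∈ l, f s x = s) :
    l.foldl f s = s := by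
  induction l with
  | nil => rfl
  | cons x xs ih =>
    rw [List.foldl_cons, h x (by simp)]
    exact ih (fun y hy => h y (by simp [hy]))

theorem updA_d (s : Int × Int × Int × Option Int) (a b c : Int) :
    ∃ m, (pvUpdA s a b c).2.2.2 = some m ∧ m ≤ a - c := by
  unfold pvUpdA
  rcases h : s.2.2.2 with _ | k
  · exact ⟨a - c, rfl, le_refl _⟩
  · by_cases hk : a - c < k
    · simp only [if_pos hk]; exact ⟨a - c, rfl, le_refl _⟩
    · simp only [if_neg hk]; exact ⟨k, h, by omega⟩

theorem updA_noop {s : Int × Int × Int × Option Int} {m : Int} (a b c : Int)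
    (hm : s.2.2.2 = some m) (hle : m ≤ a - c) : pvUpdA s a b c = s := by
  unfold pvUpdA
  rw [hm]
  simp only [if_neg (by omega : ¬ a - c < m)]

theorem foldC_eq {C : List Int} (hC : C.Pairwise (fun p q => q ≤ p)) :
    ∀ (s : Int × Int × Int × Option Int) (a b : Int),
      C.foldl (pvStepC a b) s =
        match pvMaxBelow C b with
        | none => s
        | some z => pvUpdA s a b z := by
  induction C with
  | nil => intro s a b; simp [pvMaxBelow]
  | cons v vs ih =>
    intro s a b
    rcases List.pairwise_cons.mp hC with ⟨hv, hvs⟩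
    by_cases hvb : v < b
    · have h1 : pvStepC a b s v = pvUpdA s a b v := by
        simp [pvStepC, if_neg (by omega : ¬ b ≤ v)]
      obtain ⟨m, hm, hmle⟩ := updA_d s a b v
      rw [List.foldl_cons, h1, foldl_fixed]
      · simp [pvMaxBelow, hvb]
      · intro c' hc'
        have hcv : c' ≤ v := hv c' hc'
        by_cases hbc : b ≤ c'
        · simp [pvStepC, hbc]
        · simp only [pvStepC, if_neg hbc]
          exact updA_noop a b c' hm (by omega)
    · have h1 : pvStepC a b s v = s := by
        simp [pvStepC, if_pos (by omega : b ≤ v)]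
      rw [List.foldl_cons, h1, ih hvs]
      simp [pvMaxBelow, hvb]

def pvCand (B C : List Int) (s : Int × Int × Int × Option Int) (a : Int) :
    Int × Int × Int × Option Int :=
  match pvMaxBelow B a with
  | none => s
  | some y =>
    match pvMaxBelow C y with
    | none => s
    | some z => pvUpdA s a y z

theorem foldB_eq {B C : List Int} (hB : B.Pairwise (fun p q => q ≤ p))
    (hC : C.Pairwise (fun p q => q ≤ p)) :
    ∀ (s : Int × Int × Int × Option Int) (a : Int),
      B.foldl (pvStepB C a) s = pvCand B C s a := by
  induction B with
  | nil => intro s a; simp [pvCand, pvMaxBelow]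
  | cons v vs ih =>
    intro s a
    rcases List.pairwise_cons.mp hB with ⟨hv, hvs⟩
    by_cases hva : v < a
    · have h1 : pvStepB C a s v = C.foldl (pvStepC a v) s := by
        simp [pvStepB, if_neg (by omega : ¬ a ≤ v)]
      rw [List.foldl_cons, h1, foldC_eq hC s a v]
      cases hmb : pvMaxBelow C v with
      | none =>
        rw [foldl_fixed]
        · simp [pvCand, pvMaxBelow, hva, hmb]
        · intro b' hb'
          have hbv : b' ≤ v := hv b' hb'
          by_cases hab : a ≤ b'
          · simp [pvStepB, hab]
          · simp only [pvStepB, if_neg hab]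
            rw [foldC_eq hC s a b']
            rw [mb_none_mono hmb hbv]
      | some z =>
        obtain ⟨m, hm, hmle⟩ := updA_d s a v z
        rw [foldl_fixed]
        · simp [pvCand, pvMaxBelow, hva, hmb]
        · intro b' hb'
          have hbv : b' ≤ v := hv b' hb'
          by_cases hab : a ≤ b'
          · simp [pvStepB, hab]
          · simp only [pvStepB, if_neg hab]
            rw [foldC_eq hC _ a b']
            cases hmb' : pvMaxBelow C b' with
            | none => rfl
            | some z' =>
              obtain ⟨w, hw, hzw⟩ := mb_mono hC hmb' hbv
              rw [hmb] at hw
              have : z' ≤ z := by injection hw with hw'; omega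
              exact updA_noop a b' z' hm (by omega)
    · have h1 : pvStepB C a s v = s := by
        simp [pvStepB, if_pos (by omega : a ≤ v)]
      rw [List.foldl_cons, h1, ih hvs]
      simp [pvCand, pvMaxBelow, hva]

def pvR (init s : Int × Int × Int × Option Int) (o : Option (Int × Int × Int)) : Prop :=
  (s = init ∧ o = none) ∨
  (∃ k, s.2.2.2 = some k ∧ o = some (s.1, s.2.1, s.2.2.1) ∧ k = s.1 - s.2.2.1 ∧
    s.2.1 < s.1 ∧ s.2.2.1 < s.2.1)

theorem sim_step {B C : List Int} {init s : Int × Int × Int × Option Int}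
    {o : Option (Int × Int × Int)} (hd : init.2.2.2 = none) (hR : pvR init s o) (a : Int) :
    pvR init (pvCand B C s a) (pvStepAlt B C o a) := by
  unfold pvCand pvStepAlt
  cases hy : pvMaxBelow B a with
  | none => exact hR
  | some y =>
    dsimp only
    cases hz : pvMaxBelow C y with
    | none => exact hR
    | some z =>
      dsimp only
      have hya : y < a := mb_lt hy
      have hzy : z < y := mb_lt hz
      rcases hR with ⟨hs0, rfl⟩ | ⟨k, hk, ho, hkv, h1, h2⟩
      · have hd' : s.2.2.2 = none := by rw [hs0]; exact hd
        have hs : pvUpdA s a y z = (a, y, z, some (a - z)) := by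
          simp [pvUpdA, hd']
        rw [hs]
        exact Or.inr ⟨a - z, rfl, rfl, rfl, hya, hzy⟩
      · rw [ho]
        dsimp only
        simp only [pvUpdA, hk]
        by_cases hlt : a - z < s.1 - s.2.2.1
        · rw [if_pos (by omega), if_pos hlt]
          exact Or.inr ⟨a - z, rfl, rfl, rfl, hya, hzy⟩
        · rw [if_neg (by omega), if_neg hlt]
          exact Or.inr ⟨k, hk, rfl, hkv, h1, h2⟩

theorem sim_fold {B C : List Int} {init : Int × Int × Int × Option Int}
    (hd : init.2.2.2 = none) :
    ∀ (l : List Int) (s : Int × Int × Int × Option Int) (o : Option (Int × Int × Int)),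
      pvR init s o → pvR init (l.foldl (pvCand B C) s) (l.foldl (pvStepAlt B C) o) := by
  intro l
  induction l with
  | nil => intro s o h; exact h
  | cons x xs ih =>
    intro s o h
    exact ih _ _ (sim_step hd h x)

theorem cand_none {B C : List Int} {s : Int × Int × Int × Option Int} {a : Int}
    (h : (pvCand B C s a).2.2.2 = none) : pvCand B C s a = s := by
  unfold pvCand at h ⊢
  cases hy : pvMaxBelow B a with
  | none => rfl
  | some y =>
    simp only [hy] at h ⊢
    cases hz : pvMaxBelow C y with
    | none => rfl
    | some z =>
      simp only [hz] at h
      obtain ⟨m, hm, _⟩ := updA_d s a y z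
      rw [hm] at h
      exact absurd h (by simp)

theorem foldl_cand_none {B C : List Int} :
    ∀ (l : List Int) (s : Int × Int × Int × Option Int),
      (l.foldl (pvCand B C) s).2.2.2 = none → l.foldl (pvCand B C) s = s := by
  intro l
  induction l with
  | nil => intro s _; rfl
  | cons x xs ih =>
    intro s h
    rw [List.foldl_cons] at h ⊢
    have h1 := ih _ h
    rw [h1] at h ⊢
    exact cand_none h

theorem closest_eq (al bl cl : List Int) : pyFindClosest al bl cl = altClosest al bl cl := by
  unfold pyFindClosest altClosest
  simp only [List.length_eq_zero_iff]
  by_cases hg : al = [] ∨ bl = [] ∨ cl = []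
  · simp [hg]
  · simp only [if_neg hg]
    push Not at hg
    obtain ⟨ha, hb, hc⟩ := hg
    have hAne : pvSortDesc al ≠ [] := by
      rw [pvSortDesc, Ne, PySem.List.sorted_eq_nil_iff]; exact ha
    have hBne : pvSortDesc bl ≠ [] := by
      rw [pvSortDesc, Ne, PySem.List.sorted_eq_nil_iff]; exact hb
    have hCne : pvSortDesc cl ≠ [] := by
      rw [pvSortDesc, Ne, PySem.List.sorted_eq_nil_iff]; exact hc
    obtain ⟨a0, At, hA⟩ := List.exists_cons_of_ne_nil hAne
    obtain ⟨b0, Bt, hB⟩ := List.exists_cons_of_ne_nil hBne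
    obtain ⟨c0, Ct, hC⟩ := List.exists_cons_of_ne_nil hCne
    have hBp : (pvSortDesc bl).Pairwise (fun p q => q ≤ p) :=
      PySem.List.sorted_pairwise_rev bl (fun x => x)
    have hCp : (pvSortDesc cl).Pairwise (fun p q => q ≤ p) :=
      PySem.List.sorted_pairwise_rev cl (fun x => x)
    have hfold : (fun (s : Int × Int × Int × Option Int) a =>
        (pvSortDesc bl).foldl (pvStepB (pvSortDesc cl) a) s) =
        pvCand (pvSortDesc bl) (pvSortDesc cl) := by
      funext s a
      exact foldB_eq hBp hCp s a
    simp only [hfold]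
    set init : Int × Int × Int × Option Int :=
      ((pvSortDesc al).headI, (pvSortDesc bl).headI, (pvSortDesc cl).headI, none) with hinit
    have hR := sim_fold (B := pvSortDesc bl) (C := pvSortDesc cl) (init := init) rfl
      (pvSortDesc al) init none (Or.inl ⟨rfl, rfl⟩)
    set sf := (pvSortDesc al).foldl (pvCand (pvSortDesc bl) (pvSortDesc cl)) init with hsf
    set od := (pvSortDesc al).foldl (pvStepAlt (pvSortDesc bl) (pvSortDesc cl)) none with hof
    rcases hR with ⟨hs, ho⟩ | ⟨k, hk, ho, hkv, h1, h2⟩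
    · rw [ho]
      rw [if_neg]
      intro ⟨hab, hbc⟩
      rw [hs, hinit] at hab hbc
      simp only [hA, hB, hC, List.headI] at hab hbc
      have hdn : sf.2.2.2 = none := by rw [hs, hinit]
      rw [hsf, hA, List.foldl_cons] at hdn
      have h1 := foldl_cand_none At _ hdn
      rw [h1] at hdn
      have hy : pvMaxBelow (pvSortDesc bl) a0 = some b0 := by
        rw [hB, pvMaxBelow, if_pos hab]
      have hz : pvMaxBelow (pvSortDesc cl) b0 = some c0 := by
        rw [hC, pvMaxBelow, if_pos hbc]
      have hthis : (pvCand (pvSortDesc bl) (pvSortDesc cl) init a0).2.2.2 = none := hdn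
      unfold pvCand at hthis
      simp only [hy, hz] at hthis
      obtain ⟨m, hm, _⟩ := updA_d init a0 b0 c0
      rw [hm] at hthis
      simp at hthis
    · rw [ho, if_pos ⟨h1, h2⟩]

theorem loop_eq : ∀ (fuel : Nat) (al bl cl : List Int) (rev : Bool),
    altLoop fuel al bl cl rev =
      (if rev then (pyLoop fuel al bl cl).map List.reverse else pyLoop fuel al bl cl) := by
  intro fuel
  induction fuel with
  | zero => intro al bl cl rev; cases rev <;> simp [pyLoop, altLoop]
  | succ f ih =>
    intro al bl cl rev
    rw [altLoop, pyLoop, ← closest_eq]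
    cases h : pyFindClosest al bl cl with
    | none => cases rev <;> simp
    | some t =>
      obtain ⟨x, y, z⟩ := t
      simp only [ih, List.map_cons]
      cases rev <;> simp

-- ===== VERDICT (by name: the statement is the Claim_ definition above) =====
theorem find_all_closest_triplet_spec : Claim_equal_find_all_closest_triplet := by
  intro a b c rev _
  unfold Spec_find_all_closest_triplet find_all_closest_triplet find_all_closest_triplet_alt
  rw [loop_eq]
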